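-- pv_equiv track=rewrite | github.com/atlifryer/advent2024 | 12.py | group_boundary_edges
-- ===== SOURCE A (Python) =====
-- def group_boundary_edges(edges):
--     grouped_edges = {
--         "N": [],
--         "E": [],
--         "S": [],
--         "W": []
--     }
--
--     for (r, c), direction in edges:
--         grouped_edges[direction].append((r, c))
--
--     # Sort edges for each direction to prepare for finding continuous segments
--     for direction in grouped_edges:
--         if direction in ["N", "S"]:
--             grouped_edges[direction].sort(key=lambda coord: (coord[0], coord[1]))
--         else:
--             grouped_edges[direction].sort(key=lambda coord: (coord[1], coord[0]))
--
--     return grouped_edges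
-- ===== SOURCE B (Python) =====
-- def group_boundary_edges(edges):
--     # One global stable sort with a per-edge key, then a single distribution
--     # pass into the four buckets: stability makes each bucket come out sorted.
--     grouped = {"N": [], "E": [], "S": [], "W": []}
--
--     def sort_key(edge):
--         (r, c), d = edge
--         return (r, c) if d in ("N", "S") else (c, r)
--
--     for (r, c), direction in sorted(edges, key=sort_key):
--         grouped[direction].append((r, c))
--
--     return grouped
-- ===== Notes on version B (the rewrite author's own statement) =====
-- stated objective: alternative
-- what changed: Replaces the group-then-sort-each-of-four-buckets scheme by one global stable sort of all edges under a per-edge coordinate key followed by a single distribution pass, relying on sort stability so each bucket arrives already sorted.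
import Mathlib
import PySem

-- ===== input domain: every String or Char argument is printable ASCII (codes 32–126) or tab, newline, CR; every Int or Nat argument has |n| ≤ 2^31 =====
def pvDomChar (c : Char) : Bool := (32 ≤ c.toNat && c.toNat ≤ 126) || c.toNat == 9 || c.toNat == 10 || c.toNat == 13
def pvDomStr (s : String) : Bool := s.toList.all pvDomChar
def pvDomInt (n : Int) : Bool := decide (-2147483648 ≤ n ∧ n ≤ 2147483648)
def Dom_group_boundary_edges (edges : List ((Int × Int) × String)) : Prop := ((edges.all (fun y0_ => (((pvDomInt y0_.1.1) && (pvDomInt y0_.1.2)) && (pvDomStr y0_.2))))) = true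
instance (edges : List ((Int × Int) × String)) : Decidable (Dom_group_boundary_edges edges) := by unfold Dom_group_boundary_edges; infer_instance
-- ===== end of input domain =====

-- B replaces A's group-then-sort-four-buckets scheme by one global stable sort
-- plus a single distribution pass (objective: alternative decomposition).
-- (A mutates its local dict/lists only; no caller-visible mutation.)


-- ===== PORT A =====
def group_boundary_edges (edges : List ((Int × Int) × String)) : List (String × List (Int × Int)) :=
  let grouped0 : PySem.Dict String (List (Int × Int)) :=
    PySem.Dict.ofList [("N", []), ("E", []), ("S", []), ("W", [])]
  let grouped := edges.foldl (fun d e => d.modify e.2 [] (fun l => l ++ [e.1])) grouped0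
  let grouped2 := grouped.keys.foldl (fun d dir =>
      if dir = "N" ∨ dir = "S" then
        d.modify dir [] (fun l => PySem.List.sorted2 l (fun c => c.1) (fun c => c.2))
      else
        d.modify dir [] (fun l => PySem.List.sorted2 l (fun c => c.2) (fun c => c.1))) grouped
  grouped2.items

-- ===== PORT B =====
def group_boundary_edges_alt (edges : List ((Int × Int) × String)) : List (String × List (Int × Int)) :=
  let grouped : PySem.Dict String (List (Int × Int)) :=
    PySem.Dict.ofList [("N", []), ("E", []), ("S", []), ("W", [])]
  let ss := PySem.List.sorted2 edges
      (fun e => if e.2 = "N" ∨ e.2 = "S" then e.1.1 else e.1.2)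
      (fun e => if e.2 = "N" ∨ e.2 = "S" then e.1.2 else e.1.1)
  (ss.foldl (fun d e => d.modify e.2 [] (fun l => l ++ [e.1])) grouped).items

-- ===== PRECONDITION & SPEC =====
-- Pre_ excludes exactly the inputs on which A raises KeyError: an edge whose
-- direction string is not one of "N"/"E"/"S"/"W" (B raises KeyError there too).
def Pre_group_boundary_edges (edges : List ((Int × Int) × String)) : Prop :=
  ∀ e ∈ edges, e.2 = "N" ∨ e.2 = "E" ∨ e.2 = "S" ∨ e.2 = "W"
instance (edges : List ((Int × Int) × String)) : Decidable (Pre_group_boundary_edges edges) := by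
  unfold Pre_group_boundary_edges; infer_instance
def pvWitness_group_boundary_edges : (List ((Int × Int) × String)) :=
  [((1, 2), "N"), ((0, 2), "E"), ((1, 2), "N"), ((3, -1), "W"), ((1, 1), "S")]
def Spec_group_boundary_edges (edges : List ((Int × Int) × String)) (out : List (String × List (Int × Int))) : Prop := out = group_boundary_edges_alt edges
instance (edges : List ((Int × Int) × String)) (out : List (String × List (Int × Int))) : Decidable (Spec_group_boundary_edges edges out) := by unfold Spec_group_boundary_edges; infer_instance

-- ===== CLAIM (what is proved, stated in full; the proofs are below) =====
def Claim_equal_group_boundary_edges : Prop := ∀ (edges : List ((Int × Int) × String)), Dom_group_boundary_edges edges → Pre_group_boundary_edges edges → Spec_group_boundary_edges edges (group_boundary_edges edges)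

-- ===== LEMMAS AND PROOFS =====

-- bucket d l = the coordinates of the edges of l with direction d, in order
def pvBucket (d : String) (l : List ((Int × Int) × String)) : List (Int × Int) :=
  (l.filter (fun e => e.2 == d)).map (fun e => e.1)

-- the distribution loop shared by both ports, made explicit
lemma fold_append_eq (l : List ((Int × Int) × String)) (a b c w : List (Int × Int))
    (h : ∀ e ∈ l, e.2 = "N" ∨ e.2 = "E" ∨ e.2 = "S" ∨ e.2 = "W") :
    l.foldl (fun d e => d.modify e.2 [] (fun v => v ++ [e.1]))
      (PySem.Dict.mk [("N", a), ("E", b), ("S", c), ("W", w)])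
    = PySem.Dict.mk [("N", a ++ pvBucket "N" l), ("E", b ++ pvBucket "E" l),
        ("S", c ++ pvBucket "S" l), ("W", w ++ pvBucket "W" l)] := by
  induction l generalizing a b c w with
  | nil => simp [pvBucket]
  | cons e t ih =>
    have he := h e (by simp)
    have ht : ∀ x ∈ t, x.2 = "N" ∨ x.2 = "E" ∨ x.2 = "S" ∨ x.2 = "W" :=
      fun x hx => h x (by simp [hx])
    rcases he with h' | h' | h' | h'
    · rw [List.foldl_cons,
        show (PySem.Dict.mk [("N", a), ("E", b), ("S", c), ("W", w)]).modify e.2 []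
            (fun v => v ++ [e.1])
          = PySem.Dict.mk [("N", a ++ [e.1]), ("E", b), ("S", c), ("W", w)] from by
          simp [PySem.Dict.modify, PySem.Dict.insert, PySem.Dict.contains,
            PySem.Dict.getD, PySem.Dict.get?, h'],
        ih _ _ _ _ ht]
      simp [pvBucket, h']
    · rw [List.foldl_cons,
        show (PySem.Dict.mk [("N", a), ("E", b), ("S", c), ("W", w)]).modify e.2 []
            (fun v => v ++ [e.1])
          = PySem.Dict.mk [("N", a), ("E", b ++ [e.1]), ("S", c), ("W", w)] from by
          simp [PySem.Dict.modify, PySem.Dict.insert, PySem.Dict.contains,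
            PySem.Dict.getD, PySem.Dict.get?, h'],
        ih _ _ _ _ ht]
      simp [pvBucket, h']
    · rw [List.foldl_cons,
        show (PySem.Dict.mk [("N", a), ("E", b), ("S", c), ("W", w)]).modify e.2 []
            (fun v => v ++ [e.1])
          = PySem.Dict.mk [("N", a), ("E", b), ("S", c ++ [e.1]), ("W", w)] from by
          simp [PySem.Dict.modify, PySem.Dict.insert, PySem.Dict.contains,
            PySem.Dict.getD, PySem.Dict.get?, h'],
        ih _ _ _ _ ht]
      simp [pvBucket, h']
    · rw [List.foldl_cons,
        show (PySem.Dict.mk [("N", a), ("E", b), ("S", c), ("W", w)]).modify e.2 []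
            (fun v => v ++ [e.1])
          = PySem.Dict.mk [("N", a), ("E", b), ("S", c), ("W", w ++ [e.1])] from by
          simp [PySem.Dict.modify, PySem.Dict.insert, PySem.Dict.contains,
            PySem.Dict.getD, PySem.Dict.get?, h'],
        ih _ _ _ _ ht]
      simp [pvBucket, h']

lemma sorted2_eq_sorted_lex {α : Type} (xs : List α) (k1 k2 : α → Int) :
    PySem.List.sorted2 xs k1 k2
      = PySem.List.sorted xs (fun x => toLex (k1 x, k2 x)) := by
  unfold PySem.List.sorted2 PySem.List.sorted
  simp only [Bool.false_eq_true, if_false]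
  congr 1
  funext acc x
  congr 1
  funext p q
  by_cases h1 : k1 p < k1 q <;> by_cases h2 : k1 q < k1 p <;>
    by_cases h3 : k2 p < k2 q <;>
    simp [h1, h2, h3, Prod.Lex.lt_iff] <;> omega

-- B's global stable sort, filtered to one direction, is A's per-bucket sort.
lemma bucket_sorted (edges : List ((Int × Int) × String)) (d : String)
    (k1 k2 : (Int × Int) → Int) (hinj : ∀ c c' : Int × Int, k1 c = k1 c' → k2 c = k2 c' → c = c')
    (hk : ∀ e : (Int × Int) × String, e.2 = d →
      ((if e.2 = "N" ∨ e.2 = "S" then e.1.1 else e.1.2) = k1 e.1 ∧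
       (if e.2 = "N" ∨ e.2 = "S" then e.1.2 else e.1.1) = k2 e.1)) :
    pvBucket d (PySem.List.sorted2 edges
        (fun e => if e.2 = "N" ∨ e.2 = "S" then e.1.1 else e.1.2)
        (fun e => if e.2 = "N" ∨ e.2 = "S" then e.1.2 else e.1.1))
    = PySem.List.sorted2 (pvBucket d edges) k1 k2 := by
  set g1 : (Int × Int) × String → Int := fun e => if e.2 = "N" ∨ e.2 = "S" then e.1.1 else e.1.2
  set g2 : (Int × Int) × String → Int := fun e => if e.2 = "N" ∨ e.2 = "S" then e.1.2 else e.1.1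
  rw [sorted2_eq_sorted_lex edges g1 g2, sorted2_eq_sorted_lex (pvBucket d edges) k1 k2]
  apply PySem.List.eq_of_perm_of_pairwise_le_of_injective
    (key := fun c : Int × Int => toLex (k1 c, k2 c))
  · intro c c' hcc
    have h1 : k1 c = k1 c' ∧ k2 c = k2 c' := by
      have := congrArg ofLex hcc
      exact ⟨congrArg Prod.fst this, congrArg Prod.snd this⟩
    exact hinj c c' h1.1 h1.2
  · -- both sides are permutations of pvBucket d edges
    have hp : (PySem.List.sorted edges (fun x => toLex (g1 x, g2 x))).Perm edges :=
      PySem.List.sorted_perm _ _ _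
    exact ((hp.filter _).map _).trans (PySem.List.sorted_perm _ _ _).symm
  · -- pairwise on the filtered global sort
    have hp := PySem.List.sorted_pairwise edges (fun x => toLex (g1 x, g2 x))
    have hf := hp.filter (fun e => e.2 == d)
    rw [pvBucket, List.pairwise_map]
    refine hf.imp_of_mem ?_
    intro e e' he he' hle
    have hd : e.2 = d := by simpa using (List.of_mem_filter he)
    have hd' : e'.2 = d := by simpa using (List.of_mem_filter he')
    have hke := hk e hd
    have hke' := hk e' hd'
    simpa [g1, g2, hke.1, hke.2, hke'.1, hke'.2] using hle
  · exact PySem.List.sorted_pairwise _ _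

-- ===== VERDICT (by name: the statement is the Claim_ definition above) =====
theorem group_boundary_edges_spec : Claim_equal_group_boundary_edges := by
  intro edges _ hpre
  unfold Spec_group_boundary_edges group_boundary_edges group_boundary_edges_alt
  simp only
  have h0 : (PySem.Dict.ofList [("N", ([] : List (Int × Int))), ("E", []), ("S", []), ("W", [])])
      = PySem.Dict.mk [("N", []), ("E", []), ("S", []), ("W", [])] := by decide
  rw [h0]
  rw [fold_append_eq edges [] [] [] [] hpre]
  have hss : ∀ e ∈ (PySem.List.sorted2 edges
      (fun e => if e.2 = "N" ∨ e.2 = "S" then e.1.1 else e.1.2)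
      (fun e => if e.2 = "N" ∨ e.2 = "S" then e.1.2 else e.1.1)),
      e.2 = "N" ∨ e.2 = "E" ∨ e.2 = "S" ∨ e.2 = "W" := by
    intro e he
    exact hpre e ((PySem.List.sorted2_perm _ _ _ _).mem_iff.mp he)
  rw [fold_append_eq _ [] [] [] [] hss]
  have hN := bucket_sorted edges "N" (fun c => c.1) (fun c => c.2)
    (by intro c c' h1 h2; exact Prod.ext h1 h2)
    (by intro e he; simp [he])
  have hS := bucket_sorted edges "S" (fun c => c.1) (fun c => c.2)
    (by intro c c' h1 h2; exact Prod.ext h1 h2)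
    (by intro e he; simp [he])
  have hE := bucket_sorted edges "E" (fun c => c.2) (fun c => c.1)
    (by intro c c' h1 h2; exact Prod.ext h2 h1)
    (by intro e he; simp [he])
  have hW := bucket_sorted edges "W" (fun c => c.2) (fun c => c.1)
    (by intro c c' h1 h2; exact Prod.ext h2 h1)
    (by intro e he; simp [he])
  simp only [List.nil_append] at *
  rw [hN, hS, hE, hW]
  -- remaining: A's second loop over the four literal keys computes the same four sorts
  simp [PySem.Dict.keys, PySem.Dict.modify, PySem.Dict.insert, PySem.Dict.contains,
    PySem.Dict.getD, PySem.Dict.get?]
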